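-- pv_equiv track=rewrite | github.com/Rachel-3/2024-Algorithm-Study | dohyeon/Programmers/Level_2/Lv2_[3차]_n진수_게임.py | solution
-- ===== SOURCE A (Python) =====
-- def solution(n, t, m, p):
--     answer = ''
--     chars = '0123456789ABCDEF'
--     result = ''
--     i = 0
--     while len(result) < t * m:
--         num_in_base_n = ''
--         num = i
--         if num == 0:
--             num_in_base_n = '0'
--         else:
--             while num > 0:
--                 num_in_base_n = chars[num % n] + num_in_base_n
--                 num //= n
--         result += num_in_base_n
--         i += 1
--     for j in range(t):
--         answer += result[(j * m) + (p - 1)]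
--
--     return answer
-- ===== SOURCE B (Python) =====
-- def solution(n, t, m, p):
--     # Single streaming pass: never build the concatenated string; collect the
--     # characters at the wanted global positions into a dict while generating.
--     chars = '0123456789ABCDEF'
--
--     def to_base(num):
--         return '' if num == 0 else to_base(num // n) + chars[num % n]
--
--     wanted = {j * m + (p - 1) for j in range(t)}
--     found = {}
--     pos, i, total = 0, 0, t * m
--     while pos < total:
--         for c in ('0' if i == 0 else to_base(i)):
--             if pos in wanted:
--                 found[pos] = c
--             pos += 1
--         i += 1
--     return ''.join(found[j * m + (p - 1)] for j in range(t))
-- ===== Notes on version B (the rewrite author's own statement) =====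
-- stated objective: alternative
-- what changed: B fuses generation and extraction into one streaming pass: it computes the wanted global positions up front, walks the base-n digits of 0,1,2,... with a position counter collecting the wanted characters into a dict, and never builds A's whole concatenated string; digit conversion is recursive instead of A's prepend loop.
-- outside the precondition, e.g. on solution(2, 3, 2, 0): A returns '110', B raises KeyError; on solution(-5, 1, 2, 2): A returns 'C', B returns 'F'; on solution(-1, -1, -2, 1): A returns '', B raises RecursionError
import Mathlib
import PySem

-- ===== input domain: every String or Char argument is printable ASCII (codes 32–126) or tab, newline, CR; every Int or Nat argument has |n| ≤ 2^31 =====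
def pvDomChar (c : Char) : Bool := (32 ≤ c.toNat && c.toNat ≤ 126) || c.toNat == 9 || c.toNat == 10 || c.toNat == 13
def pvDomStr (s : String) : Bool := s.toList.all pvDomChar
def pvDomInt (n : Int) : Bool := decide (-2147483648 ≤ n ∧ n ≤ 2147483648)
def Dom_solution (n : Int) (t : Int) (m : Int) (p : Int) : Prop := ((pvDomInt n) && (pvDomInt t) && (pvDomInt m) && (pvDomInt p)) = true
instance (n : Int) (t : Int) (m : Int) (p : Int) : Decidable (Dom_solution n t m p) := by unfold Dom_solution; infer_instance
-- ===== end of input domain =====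

-- B fuses A's build-whole-string-then-index two-pass structure into one streaming pass that
-- collects the characters at the wanted positions into a dict (objective: alternative, not faster).

-- ===== PORT A =====
def pvChars : List Char := ['0','1','2','3','4','5','6','7','8','9','A','B','C','D','E','F']

-- inner while-loop of A: prepend chars[num % n], num //= n; fuel bounds the iterations
def pvConvA (n : Int) : Nat → Int → List Char → List Char
  | 0, _, acc => acc
  | f+1, num, acc =>
    if 0 < num then
      pvConvA n f (PySem.Int.floordiv num n)
        (((PySem.List.pyGet? pvChars (PySem.Int.mod num n)).getD ' ') :: acc)
    else acc

def pvNumInBase (n i : Int) : List Char :=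
  if i = 0 then ['0'] else pvConvA n i.toNat i []

-- outer while-loop of A: append base-n form of i until len(result) >= t*m
def pvALoop (n t m : Int) : Nat → List Char → Int → List Char
  | 0, res, _ => res
  | f+1, res, i =>
    if (res.length : Int) < t * m then pvALoop n t m f (res ++ pvNumInBase n i) (i + 1)
    else res

def solution (n : Int) (t : Int) (m : Int) (p : Int) : String :=
  let result := pvALoop n t m ((t * m).toNat + 1) [] 0
  String.mk ((PySem.List.pyRange 0 t 1).foldl
    (fun acc j => acc ++ [(PySem.List.pyGet? result (j * m + (p - 1))).getD ' ']) [])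

-- ===== PORT B =====
-- Source B's recursive conversion: '' if num == 0 else to_base(num // n) + chars[num % n]
def pvToBase (n : Int) : Nat → Int → List Char
  | 0, _ => []
  | f+1, num =>
    if num = 0 then []
    else pvToBase n f (PySem.Int.floordiv num n) ++
      [(PySem.List.pyGet? pvChars (PySem.Int.mod num n)).getD ' ']

-- Source B's wanted set: {j*m + (p-1) for j in range(t)}
def pvWanted (t m p : Int) : PySem.Set Int :=
  PySem.Set.ofList ((PySem.List.pyRange 0 t 1).map (fun j => j * m + (p - 1)))

-- Source B's inner for-loop body: record c when pos is a wanted position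
def pvBStep (wanted : PySem.Set Int) (st : PySem.Dict Int Char × Int) (c : Char) :
    PySem.Dict Int Char × Int :=
  (if st.2 ∈ wanted then st.1.insert st.2 c else st.1, st.2 + 1)

-- Source B's while-loop: stream numbers i = 0,1,2,… while pos < total
def pvBLoop (n total : Int) (wanted : PySem.Set Int) :
    Nat → PySem.Dict Int Char → Int → Int → PySem.Dict Int Char
  | 0, found, _, _ => found
  | f+1, found, pos, i =>
    if pos < total then
      let ds := if i = 0 then ['0'] else pvToBase n (i.toNat + 1) i
      let st := ds.foldl (pvBStep wanted) (found, pos)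
      pvBLoop n total wanted f st.1 st.2 (i + 1)
    else found

def solution_alt (n : Int) (t : Int) (m : Int) (p : Int) : String :=
  let wanted := pvWanted t m p
  let found := pvBLoop n (t * m) wanted ((t * m).toNat + 1) PySem.Dict.empty 0 0
  String.mk ((PySem.List.pyRange 0 t 1).foldl
    (fun acc j => acc ++ [(found.get? (j * m + (p - 1))).getD ' ']) [])

-- ===== PRECONDITION & SPEC =====
-- pvL n S: closed form (one arithmetic step per digit length d, via the count d*(n^d - n^(d-1))
-- of characters contributed by the d-digit numbers) for the length of the shortest concatenation
-- '0'+'1'+… of base-n numerals whose length reaches S — the length of the string A builds.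
def pvLgo (n S : Nat) : Nat → Nat → Nat → Nat → Nat
  | 0, _, Gprev, _ => Gprev
  | f+1, d, Gprev, pw =>
    let G := Gprev + d * (pw * n - pw)
    if S ≤ G then Gprev + d * ((S - Gprev + d - 1) / d)
    else pvLgo n S f (d + 1) G (pw * n)

def pvL (n S : Int) : Int :=
  if S ≤ 0 then 0 else ((pvLgo n.toNat S.toNat 64 1 1 1 : Nat) : Int)

-- Pre_ excludes exactly the inputs where Python A raises or diverges (m ≤ 0 or base outside the
-- workable range with t ≥ 1; n ∈ {0,1} or n ≤ -18 or digit overflow for n ≥ 17 during generation;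
-- IndexError when a wanted position ≥ pvL, the length of the built string), plus two corners on
-- which A returns but B does not match: p ≤ 0 with t ≥ 1, where A's value comes from Python's
-- negative-index wraparound and B raises KeyError, and negative bases -17 ≤ n ≤ -2 with t ≥ 1,
-- where both digit strings are accidents of the two conversion loops on a domain the game does
-- not have (A's 'while num>0' emits one bogus digit per number, B's recursion through negative
-- quotients emits others; for n = -1 B's recursion diverges, so all t ≤ 0 ∧ n = -1 ∧ t*m > 1 are
-- excluded as well).  The Lean proof only uses 2 ≤ n / t*m = 1; the other conjuncts mirror Python.
def Pre_solution (n : Int) (t : Int) (m : Int) (p : Int) : Prop :=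
  if 1 ≤ t then
    1 ≤ m ∧ 1 ≤ p ∧ ((2 ≤ n ∧ (n ≤ 16 ∨ t * m ≤ 16)) ∨ t * m = 1) ∧
      (t - 1) * m + p - 1 < pvL n (t * m)
  else
    t * m ≤ 1 ∨ (-17 ≤ n ∧ n ≤ -2) ∨ (2 ≤ n ∧ n ≤ 16) ∨ (17 ≤ n ∧ t * m ≤ 16)
instance (n : Int) (t : Int) (m : Int) (p : Int) : Decidable (Pre_solution n t m p) := by
  unfold Pre_solution; infer_instance

def pvWitness_solution : Int × Int × Int × Int := (2, 4, 2, 1)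

def Spec_solution (n : Int) (t : Int) (m : Int) (p : Int) (out : String) : Prop := out = solution_alt n t m p
instance (n : Int) (t : Int) (m : Int) (p : Int) (out : String) : Decidable (Spec_solution n t m p out) := by unfold Spec_solution; infer_instance

-- ===== CLAIM (what is proved, stated in full; the proofs are below) =====
def Claim_equal_solution : Prop := ∀ (n : Int) (t : Int) (m : Int) (p : Int), Dom_solution n t m p → Pre_solution n t m p → Spec_solution n t m p (solution n t m p)

-- ===== LEMMAS AND PROOFS =====

-- canonical digit string of num (most significant first)
def pvD (n num : Int) : List Char := pvToBase n (num.toNat + 1) num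
-- what the stream emits for the k-th number
def pvE (n : Int) (k : Nat) : List Char := if k = 0 then ['0'] else pvD n (k : Int)
-- concatenation of the emissions of 0 .. k-1 (the stream prefix)
def pvS (n : Int) (k : Nat) : List Char := (List.range k).flatMap (pvE n)
-- the d-th character of the infinite stream
def pvIdx (n : Int) (d : Nat) : Char := (pvS n (d + 1)).getD d ' '

theorem pv_floordiv_lt {n num : Int} (hn : 2 ≤ n) (h : 0 < num) :
    PySem.Int.floordiv num n < num ∧ 0 ≤ PySem.Int.floordiv num n := by
  have h1 : PySem.Int.floordiv num n = ((num.toNat / n.toNat : Nat) : Int) := by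
    conv_lhs => rw [show num = ((num.toNat : Nat) : Int) by omega,
      show n = ((n.toNat : Nat) : Int) by omega]
    exact PySem.Int.floordiv_natCast _ _
  have h2 : num.toNat / n.toNat < num.toNat := Nat.div_lt_self (by omega) (by omega)
  rw [h1]
  generalize num.toNat / n.toNat = k at h2 ⊢
  omega

theorem pvToBase_fuel {n : Int} (hn : 2 ≤ n) :
    ∀ (num : Int), 0 ≤ num → ∀ f, num.toNat + 1 ≤ f → pvToBase n f num = pvD n num := by
  suffices H : ∀ (N : Nat) (num : Int), num.toNat ≤ N → 0 ≤ num → ∀ f, num.toNat + 1 ≤ f →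
      pvToBase n f num = pvD n num by
    intro num h0 f hf; exact H num.toNat num le_rfl h0 f hf
  intro N
  induction N with
  | zero =>
    intro num hN h0 f hf
    have h00 : num = 0 := by omega
    subst h00
    obtain ⟨f', rfl⟩ : ∃ f', f = f' + 1 := ⟨f - 1, by omega⟩
    simp [pvToBase, pvD]
  | succ N ih =>
    intro num hN h0 f hf
    by_cases h0' : num = 0
    · subst h0'
      obtain ⟨f', rfl⟩ : ∃ f', f = f' + 1 := ⟨f - 1, by omega⟩
      simp [pvToBase, pvD]
    · have hpos : 0 < num := by omega
      obtain ⟨hlt, hq0⟩ := pv_floordiv_lt hn hpos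
      obtain ⟨f', rfl⟩ : ∃ f', f = f' + 1 := ⟨f - 1, by omega⟩
      have h1 : pvToBase n (f' + 1) num =
          pvToBase n f' (PySem.Int.floordiv num n) ++
            [(PySem.List.pyGet? pvChars (PySem.Int.mod num n)).getD ' '] := by
        simp [pvToBase, h0']
      have h2 : pvD n num =
          pvToBase n num.toNat (PySem.Int.floordiv num n) ++
            [(PySem.List.pyGet? pvChars (PySem.Int.mod num n)).getD ' '] := by
        simp [pvD]
        obtain ⟨g, hg⟩ : ∃ g, num.toNat + 1 = g + 1 := ⟨num.toNat, rfl⟩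
        rw [hg, pvToBase, if_neg h0']
        simp [show g = num.toNat by omega]
      rw [h1, h2, ih _ (by omega) hq0 f' (by omega), ih _ (by omega) hq0 num.toNat (by omega)]

theorem pvConvA_eq {n : Int} (hn : 2 ≤ n) :
    ∀ (num : Int), 0 ≤ num → ∀ f (acc : List Char), num.toNat ≤ f →
      pvConvA n f num acc = pvD n num ++ acc := by
  suffices H : ∀ (N : Nat) (num : Int), num.toNat ≤ N → 0 ≤ num → ∀ f (acc : List Char),
      num.toNat ≤ f → pvConvA n f num acc = pvD n num ++ acc by
    intro num h0 f acc hf; exact H num.toNat num le_rfl h0 f acc hf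
  intro N
  induction N with
  | zero =>
    intro num hN h0 f acc hf
    have h00 : num = 0 := by omega
    subst h00
    cases f with
    | zero => simp [pvConvA, pvD, pvToBase]
    | succ f' => simp [pvConvA, pvD, pvToBase]
  | succ N ih =>
    intro num hN h0 f acc hf
    by_cases h0' : num = 0
    · subst h0'
      cases f with
      | zero => simp [pvConvA, pvD, pvToBase]
      | succ f' => simp [pvConvA, pvD, pvToBase]
    · have hpos : 0 < num := by omega
      obtain ⟨hlt, hq0⟩ := pv_floordiv_lt hn hpos
      obtain ⟨f', rfl⟩ : ∃ f', f = f' + 1 := ⟨f - 1, by omega⟩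
      have h1 : pvConvA n (f' + 1) num acc =
          pvConvA n f' (PySem.Int.floordiv num n)
            (((PySem.List.pyGet? pvChars (PySem.Int.mod num n)).getD ' ') :: acc) := by
        simp [pvConvA, hpos]
      have h2 : pvD n num =
          pvD n (PySem.Int.floordiv num n) ++
            [(PySem.List.pyGet? pvChars (PySem.Int.mod num n)).getD ' '] := by
        have h3 : pvD n num =
            pvToBase n num.toNat (PySem.Int.floordiv num n) ++
              [(PySem.List.pyGet? pvChars (PySem.Int.mod num n)).getD ' '] := by
          simp [pvD]
          obtain ⟨g, hg⟩ : ∃ g, num.toNat + 1 = g + 1 := ⟨num.toNat, rfl⟩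
          rw [hg, pvToBase, if_neg h0']
          simp [show g = num.toNat by omega]
        rw [h3, pvToBase_fuel hn _ hq0 num.toNat (by omega)]
      rw [h1, ih _ (by omega) hq0 f' _ (by omega), h2]
      simp

theorem pvNumInBase_eq {n : Int} (hn : 2 ≤ n) (k : Nat) :
    pvNumInBase n (k : Int) = pvE n k := by
  cases k with
  | zero => simp [pvNumInBase, pvE]
  | succ k' =>
    have hne : ((k' + 1 : Nat) : Int) ≠ 0 := by omega
    rw [pvNumInBase, if_neg hne, pvE, if_neg (by omega),
      pvConvA_eq hn _ (by omega) _ _ (by simp)]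
    simp

theorem pvE_ne_nil {n : Int} (k : Nat) : pvE n k ≠ [] := by
  cases k with
  | zero => simp [pvE]
  | succ k' =>
    rw [pvE, if_neg (by omega), pvD]
    have h1 : (((k' + 1 : Nat) : Int)).toNat + 1 = (k' + 1) + 1 := by omega
    rw [h1, pvToBase, if_neg (by exact_mod_cast Nat.succ_ne_zero k')]
    simp

theorem pvS_succ (n : Int) (k : Nat) : pvS n (k + 1) = pvS n k ++ pvE n k := by
  simp [pvS, List.range_succ]

theorem pvS_len_ge {n : Int} (k : Nat) : k ≤ (pvS n k).length := by
  induction k with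
  | zero => simp [pvS]
  | succ k ih =>
    rw [pvS_succ, List.length_append]
    have := List.length_pos_of_ne_nil (pvE_ne_nil (n := n) k)
    omega

theorem pvS_prefix {n : Int} {a b : Nat} (h : a ≤ b) : pvS n a <+: pvS n b := by
  induction b with
  | zero => simp [show a = 0 by omega]
  | succ b ih =>
    rcases Nat.lt_or_ge a (b + 1) with hab | hab
    · exact (ih (by omega)).trans (by rw [pvS_succ]; exact List.prefix_append _ _)
    · simp [show a = b + 1 by omega]

theorem pvS_getD {n : Int} (d k : Nat) (h : d < (pvS n k).length) :
    (pvS n k).getD d ' ' = pvIdx n d := by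
  have hd : d < (pvS n (d + 1)).length := lt_of_lt_of_le (by omega) (pvS_len_ge (d + 1))
  rcases Nat.le_total k (d + 1) with hkd | hkd
  · have hpre := pvS_prefix (n := n) hkd
    rw [List.getD_eq_getElem _ _ h, pvIdx, List.getD_eq_getElem _ _ hd]
    exact hpre.getElem h
  · have hpre := pvS_prefix (n := n) hkd
    rw [List.getD_eq_getElem _ _ h, pvIdx, List.getD_eq_getElem _ _ hd]
    exact (hpre.getElem hd).symm

-- A's outer loop stops at the first stream prefix of length ≥ t*m
theorem pvALoop_spec {n t m : Int} (hn : 2 ≤ n) :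
    ∀ (f : Nat) (k : Nat), t * m ≤ ((pvS n k).length : Int) + f →
      ∃ K : Nat, k ≤ K ∧ t * m ≤ ((pvS n K).length : Int) ∧
        (∀ k', k ≤ k' → k' < K → ((pvS n k').length : Int) < t * m) ∧
        pvALoop n t m f (pvS n k) (k : Int) = pvS n K := by
  intro f
  induction f with
  | zero =>
    intro k hk
    exact ⟨k, le_rfl, by simpa using hk, by omega, rfl⟩
  | succ f ih =>
    intro k hk
    by_cases hc : ((pvS n k).length : Int) < t * m
    · have hstep : pvALoop n t m (f + 1) (pvS n k) (k : Int) =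
          pvALoop n t m f (pvS n (k + 1)) ((k + 1 : Nat) : Int) := by
        rw [pvALoop, if_pos hc, pvNumInBase_eq hn, ← pvS_succ]
        norm_num
      have hlen : (pvS n k).length + 1 ≤ (pvS n (k + 1)).length := by
        rw [pvS_succ, List.length_append]
        have := List.length_pos_of_ne_nil (pvE_ne_nil (n := n) k)
        omega
      obtain ⟨K, hK1, hK2, hK3, hK4⟩ := ih (k + 1) (by push_cast at hk ⊢; omega)
      refine ⟨K, by omega, hK2, ?_, by rw [hstep, hK4]⟩
      intro k' h1 h2
      rcases Nat.lt_or_ge k' (k + 1) with h3 | h3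
      · have : k' = k := by omega
        subst this; exact hc
      · exact hK3 k' h3 h2
    · exact ⟨k, le_rfl, by omega, by omega, by rw [pvALoop, if_neg hc]⟩

-- Source B's inner for-loop: position advances by the digit count, the dict picks up the
-- wanted positions of this number, everything else is untouched
theorem pv_foldl_bstep (wanted : PySem.Set Int) :
    ∀ (ds : List Char) (found : PySem.Dict Int Char) (pos : Int),
      (ds.foldl (pvBStep wanted) (found, pos)).2 = pos + ds.length ∧
      ∀ q, (ds.foldl (pvBStep wanted) (found, pos)).1.get? q =
        if pos ≤ q ∧ q < pos + ds.length ∧ q ∈ wanted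
          then some (ds.getD (q - pos).toNat ' ') else found.get? q := by
  intro ds
  induction ds with
  | nil =>
    intro found pos
    refine ⟨by simp, fun q => ?_⟩
    rw [if_neg (by simp; omega)]
    rfl
  | cons c cs ih =>
    intro found pos
    rw [List.foldl_cons]
    have hstep : pvBStep wanted (found, pos) c =
        (if pos ∈ wanted then found.insert pos c else found, pos + 1) := rfl
    rw [hstep]
    obtain ⟨ih1, ih2⟩ := ih (if pos ∈ wanted then found.insert pos c else found) (pos + 1)
    refine ⟨by rw [ih1]; simp only [List.length_cons]; push_cast; ring, fun q => ?_⟩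
    rw [ih2 q]
    by_cases h1 : pos + 1 ≤ q ∧ q < pos + 1 + (cs.length : Int) ∧ q ∈ wanted
    · rw [if_pos h1, if_pos (show pos ≤ q ∧ q < pos + ((c :: cs).length : Int) ∧ q ∈ wanted by
        refine ⟨by omega, ?_, h1.2.2⟩
        simp only [List.length_cons]
        push_cast
        omega)]
      have hidx : (q - pos).toNat = (q - (pos + 1)).toNat + 1 := by omega
      rw [hidx]
      simp
    · rw [if_neg h1]
      by_cases hq : q = pos
      · rw [hq]
        by_cases hw : pos ∈ wanted
        · rw [if_pos hw, PySem.Dict.get?_insert, if_pos rfl,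
            if_pos (show pos ≤ pos ∧ pos < pos + ((c :: cs).length : Int) ∧ pos ∈ wanted by
              refine ⟨le_rfl, ?_, hw⟩
              simp only [List.length_cons]
              push_cast
              omega)]
          simp
        · rw [if_neg hw, if_neg (fun hcon => hw hcon.2.2)]
      · rw [if_neg (show ¬(pos ≤ q ∧ q < pos + ((c :: cs).length : Int) ∧ q ∈ wanted) by
          rintro ⟨g1, g2, g3⟩
          refine h1 ⟨by omega, ?_, g3⟩
          simp only [List.length_cons] at g2
          push_cast at g2 ⊢
          omega)]
        by_cases hw : pos ∈ wanted
        · rw [if_pos hw, PySem.Dict.get?_insert, if_neg hq]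
        · rw [if_neg hw]

-- B's while-loop stops at the first stream prefix of length ≥ total, having recorded
-- exactly the wanted positions below that length
theorem pvBLoop_spec {n total : Int} (hn : 2 ≤ n) (wanted : PySem.Set Int) :
    ∀ (f : Nat) (k : Nat) (found : PySem.Dict Int Char),
      total ≤ ((pvS n k).length : Int) + f →
      (∀ q : Int, found.get? q =
        if 0 ≤ q ∧ q < ((pvS n k).length : Int) ∧ q ∈ wanted
          then some (pvIdx n q.toNat) else none) →
      ∃ K : Nat, k ≤ K ∧ total ≤ ((pvS n K).length : Int) ∧
        (∀ k', k ≤ k' → k' < K → ((pvS n k').length : Int) < total) ∧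
        ∀ q : Int,
          (pvBLoop n total wanted f found ((pvS n k).length : Int) (k : Int)).get? q =
            if 0 ≤ q ∧ q < ((pvS n K).length : Int) ∧ q ∈ wanted
              then some (pvIdx n q.toNat) else none := by
  intro f
  induction f with
  | zero =>
    intro k found hk hinv
    exact ⟨k, le_rfl, by simpa using hk, by omega, by
      intro q
      rw [pvBLoop, hinv q]⟩
  | succ f ih =>
    intro k found hk hinv
    by_cases hc : ((pvS n k).length : Int) < total
    · have hds : (if (k : Int) = 0 then ['0'] else pvToBase n ((k : Int).toNat + 1) (k : Int)) =
          pvE n k := by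
        cases k with
        | zero => simp [pvE]
        | succ k' =>
          rw [if_neg (by exact_mod_cast Nat.succ_ne_zero k'), pvE, if_neg (by omega)]
          have h1 : (((k' + 1 : Nat) : Int)).toNat = k' + 1 := by omega
          rw [h1]; rfl
      obtain ⟨hf1, hf2⟩ := pv_foldl_bstep wanted (pvE n k) found ((pvS n k).length : Int)
      have hlen1 : ((pvS n k).length : Int) + ((pvE n k).length : Int) =
          ((pvS n (k + 1)).length : Int) := by
        rw [pvS_succ, List.length_append]; push_cast; ring
      have hstep : pvBLoop n total wanted (f + 1) found ((pvS n k).length : Int) (k : Int) =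
          pvBLoop n total wanted f
            ((pvE n k).foldl (pvBStep wanted) (found, ((pvS n k).length : Int))).1
            ((pvS n (k + 1)).length : Int) ((k + 1 : Nat) : Int) := by
        rw [pvBLoop, if_pos hc]
        show pvBLoop n total wanted f
            ((if (k : Int) = 0 then ['0'] else pvToBase n ((k : Int).toNat + 1) (k : Int)).foldl
              (pvBStep wanted) (found, ((pvS n k).length : Int))).1
            ((if (k : Int) = 0 then ['0'] else pvToBase n ((k : Int).toNat + 1) (k : Int)).foldl
              (pvBStep wanted) (found, ((pvS n k).length : Int))).2
            ((k : Int) + 1) = _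
        rw [hds, hf1, hlen1]
        norm_num
      have hinv' : ∀ q : Int,
          ((pvE n k).foldl (pvBStep wanted) (found, ((pvS n k).length : Int))).1.get? q =
            if 0 ≤ q ∧ q < ((pvS n (k + 1)).length : Int) ∧ q ∈ wanted
              then some (pvIdx n q.toNat) else none := by
        intro q
        rw [hf2 q, hinv q]
        by_cases hmid : ((pvS n k).length : Int) ≤ q ∧
            q < ((pvS n k).length : Int) + ((pvE n k).length : Int) ∧ q ∈ wanted
        · obtain ⟨h1, h2, h3⟩ := hmid
          rw [if_pos ⟨h1, h2, h3⟩, if_pos ⟨by omega, by omega, h3⟩]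
          congr 1
          have hq1 : q.toNat < (pvS n (k + 1)).length := by omega
          rw [← pvS_getD q.toNat (k + 1) hq1, pvS_succ,
            List.getD_append_right _ _ _ _ (by omega)]
          congr 1
          omega
        · rw [if_neg hmid]
          by_cases hlow : 0 ≤ q ∧ q < ((pvS n k).length : Int) ∧ q ∈ wanted
          · rw [if_pos hlow, if_pos ⟨hlow.1, by omega, hlow.2.2⟩]
          · rw [if_neg hlow, if_neg (by
              rintro ⟨g1, g2, g3⟩
              have hmid' : ¬(((pvS n k).length : Int) ≤ q ∧
                  q < ((pvS n k).length : Int) + ((pvE n k).length : Int)) :=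
                fun hh => hmid ⟨hh.1, hh.2, g3⟩
              have hlow' : ¬((0 : Int) ≤ q ∧ q < ((pvS n k).length : Int)) :=
                fun hh => hlow ⟨hh.1, hh.2, g3⟩
              omega)]
      have hlen : (pvS n k).length + 1 ≤ (pvS n (k + 1)).length := by
        rw [pvS_succ, List.length_append]
        have := List.length_pos_of_ne_nil (pvE_ne_nil (n := n) k)
        omega
      obtain ⟨K, hK1, hK2, hK3, hK4⟩ := ih (k + 1) _ (by push_cast at hk ⊢; omega) hinv'
      refine ⟨K, by omega, hK2, ?_, by rw [hstep]; exact hK4⟩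
      intro k' h1 h2
      rcases Nat.lt_or_ge k' (k + 1) with h3 | h3
      · have : k' = k := by omega
        subst this; exact hc
      · exact hK3 k' h3 h2
    · refine ⟨k, le_rfl, by omega, by omega, ?_⟩
      intro q
      rw [pvBLoop, if_neg hc, hinv q]

-- main case: 2 ≤ n, 1 ≤ m, 1 ≤ p — both sides read the same stream characters
theorem pv_main {n t m p : Int} (hn : 2 ≤ n) (hm : 1 ≤ m) (hp : 1 ≤ p) :
    solution n t m p = solution_alt n t m p := by
  -- A's loop result
  obtain ⟨KA, _, hKA2, hKA3, hKA4⟩ :=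
    pvALoop_spec (t := t) (m := m) hn ((t * m).toNat + 1) 0
      (by simp [pvS]; generalize t * m = x; omega)
  have hAres : pvALoop n t m ((t * m).toNat + 1) [] 0 = pvS n KA := by
    have h0 : pvS n 0 = [] := rfl
    rw [← h0, ← hKA4]
    norm_num
  -- B's loop result
  obtain ⟨KB, _, hKB2, hKB3, hKB4⟩ :=
    pvBLoop_spec (total := t * m) hn (pvWanted t m p) ((t * m).toNat + 1) 0 PySem.Dict.empty
      (by simp [pvS]; generalize t * m = x; omega)
      (by
        intro q
        rw [PySem.Dict.get?_empty, if_neg (by simp [pvS]; omega)])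
  -- both loops stop at the same prefix
  have hKK : KA = KB := by
    rcases Nat.lt_trichotomy KA KB with h | h | h
    · have := hKB3 KA (by omega) h
      omega
    · exact h
    · have := hKA3 KB (by omega) h
      omega
  subst hKK
  have hBres : ∀ q : Int,
      (pvBLoop n (t * m) (pvWanted t m p) ((t * m).toNat + 1) PySem.Dict.empty 0 0).get? q =
        if 0 ≤ q ∧ q < ((pvS n KA).length : Int) ∧ q ∈ pvWanted t m p
          then some (pvIdx n q.toNat) else none := by
    intro q
    have h0 : ((pvS n (0 : Nat)).length : Int) = 0 := by simp [pvS]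
    have h1 := hKB4 q
    rw [h0] at h1
    simpa using h1
  -- assemble: compare the two folds position by position
  simp only [solution, solution_alt]
  rw [hAres, PySem.List.foldl_append_singleton_eq_map, PySem.List.foldl_append_singleton_eq_map]
  refine congrArg String.mk (List.map_congr_left ?_)
  intro j hj
  have hj' : 0 ≤ j ∧ j < t := (PySem.List.mem_pyRange_one).mp hj
  have hq0 : 0 ≤ j * m + (p - 1) := by
    have : 0 ≤ j * m := mul_nonneg hj'.1 (by omega)
    omega
  have hqw : j * m + (p - 1) ∈ pvWanted t m p := by
    rw [pvWanted, PySem.Set.mem_ofList]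
    exact List.mem_map.mpr ⟨j, hj, rfl⟩
  rw [hBres (j * m + (p - 1))]
  by_cases hlt : j * m + (p - 1) < ((pvS n KA).length : Int)
  · rw [if_pos ⟨hq0, hlt, hqw⟩]
    have hnat : (j * m + (p - 1)).toNat < (pvS n KA).length := by omega
    rw [PySem.List.pyGet?_of_nonneg _ hq0, List.getElem?_eq_getElem hnat]
    simp only [Option.getD_some]
    rw [← List.getD_eq_getElem _ ' ' hnat, pvS_getD _ _ hnat]
  · rw [if_neg (by rintro ⟨g1, g2, g3⟩; exact hlt g2)]
    rw [PySem.List.pyGet?_of_nonneg _ hq0, List.getElem?_eq_none (by omega)]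

-- degenerate case t*m = 1 with t ≥ 1, m ≥ 1, p = 1: both produce "0" for any base
theorem pv_one {n : Int} : solution n 1 1 1 = solution_alt n 1 1 1 := by
  simp [solution, solution_alt, pvALoop, pvNumInBase, pvBLoop, pvBStep, pvWanted,
    PySem.List.pyRange, PySem.Set.ofList, PySem.Set.add,
    PySem.List.pyGet?, PySem.List.pyIdx?, PySem.Dict.get?, PySem.Dict.insert,
    PySem.Dict.empty, List.range_succ]

-- ===== VERDICT (by name: the statement is the Claim_ definition above) =====
theorem solution_spec : Claim_equal_solution := by
  intro n t m p hdom hpre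
  unfold Spec_solution
  unfold Pre_solution at hpre
  by_cases ht : 1 ≤ t
  · rw [if_pos ht] at hpre
    obtain ⟨hm, hp, hcase, hlast⟩ := hpre
    rcases hcase with ⟨hn, _⟩ | h1
    · exact pv_main hn hm hp
    · -- t*m = 1 with t,m ≥ 1 forces t = m = 1; then pvL n 1 = 1 forces p = 1
      have ht1 : t = 1 ∧ m = 1 := by
        constructor <;> nlinarith
      obtain ⟨rfl, rfl⟩ := ht1
      have hL : pvL n 1 = 1 := by
        rw [pvL, if_neg (by omega)]
        simp [pvLgo]
      have hp1 : p = 1 := by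
        have h2 : (1 - 1 : Int) * 1 + p - 1 < pvL n (1 * 1) := hlast
        rw [show ((1 : Int) * 1) = 1 by norm_num, hL] at h2
        omega
      subst hp1
      exact pv_one
  · -- t ≤ 0: the extraction range is empty on both sides
    have ht0 : t ≤ 0 := by omega
    simp [solution, solution_alt, PySem.List.pyRange_one_eq_nil ht0]
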